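-- pv_equiv track=rewrite | github.com/HansGerkSrh/advent2024 | day07/Part1.py | permutation_generator
-- ===== SOURCE A (Python) =====
-- def permutation_generator(operator_amount, dimension):
--     if operator_amount == 0:
--         return [[]]
--     smaller = permutation_generator(operator_amount- 1, dimension)
--     result = []
--     for i in smaller:
--         for digit in range(dimension):
--             result.append(i + [digit])
--     return result
-- ===== SOURCE B (Python) =====
-- def permutation_generator(operator_amount, dimension):
--     result = [[]]
--     for _ in range(operator_amount):
--         result = [prefix + [d] for prefix in result for d in range(dimension)]
--     return result
-- ===== Notes on version B (the rewrite author's own statement) =====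
-- stated objective: simpler
-- what changed: Replaces the recursion (recurse to 0, then nested append loops) with a single iterative accumulator: start from [[]] and extend every prefix by each digit, operator_amount times.
import Mathlib
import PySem

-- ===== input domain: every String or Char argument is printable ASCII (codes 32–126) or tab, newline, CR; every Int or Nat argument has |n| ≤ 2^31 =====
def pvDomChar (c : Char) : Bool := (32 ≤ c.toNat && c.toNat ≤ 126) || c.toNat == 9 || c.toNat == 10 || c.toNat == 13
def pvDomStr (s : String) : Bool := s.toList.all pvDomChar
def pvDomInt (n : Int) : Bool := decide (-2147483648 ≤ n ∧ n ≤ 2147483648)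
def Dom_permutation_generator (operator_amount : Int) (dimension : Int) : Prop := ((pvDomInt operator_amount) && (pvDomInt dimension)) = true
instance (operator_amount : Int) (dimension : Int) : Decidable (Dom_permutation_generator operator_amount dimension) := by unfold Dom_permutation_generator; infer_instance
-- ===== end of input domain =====

-- B replaces A's recursion by a single iterative accumulator loop; same output, stated simpler.


-- ===== PORT A =====
-- A's recursion on operator_amount; for negative operator_amount Python never reaches the
-- base case (RecursionError), so those inputs are outside Pre_ and the port recurses on .toNat.
def permGoA : Nat → Int → List (List Int)
  | 0, _ => [[]]
  | n + 1, dimension =>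
    let smaller := permGoA n dimension
    smaller.foldl
      (fun result i =>
        (PySem.List.pyRange 0 dimension 1).foldl
          (fun result digit => result ++ [i ++ [digit]]) result)
      []

def permutation_generator (operator_amount : Int) (dimension : Int) : List (List Int) :=
  permGoA operator_amount.toNat dimension

-- ===== PORT B =====
def permutation_generator_alt (operator_amount : Int) (dimension : Int) : List (List Int) :=
  (PySem.List.pyRange 0 operator_amount 1).foldl
    (fun result _ =>
      result.flatMap (fun pfx => (PySem.List.pyRange 0 dimension 1).map (fun d => pfx ++ [d])))
    [[]]

-- ===== PRECONDITION & SPEC =====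
-- Pre_ excludes negative operator_amount, on which Python A raises RecursionError.
def Pre_permutation_generator (operator_amount : Int) (dimension : Int) : Prop :=
  0 ≤ operator_amount
instance (operator_amount : Int) (dimension : Int) : Decidable (Pre_permutation_generator operator_amount dimension) := by unfold Pre_permutation_generator; infer_instance
def pvWitness_permutation_generator : Int × Int := (2, 3)

def Spec_permutation_generator (operator_amount : Int) (dimension : Int) (out : List (List Int)) : Prop := out = permutation_generator_alt operator_amount dimension
instance (operator_amount : Int) (dimension : Int) (out : List (List Int)) : Decidable (Spec_permutation_generator operator_amount dimension out) := by unfold Spec_permutation_generator; infer_instance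

-- ===== CLAIM (what is proved, stated in full; the proofs are below) =====
def Claim_equal_permutation_generator : Prop := ∀ (operator_amount : Int) (dimension : Int), Dom_permutation_generator operator_amount dimension → Pre_permutation_generator operator_amount dimension → Spec_permutation_generator operator_amount dimension (permutation_generator operator_amount dimension)
-- ===== LEMMAS AND PROOFS =====

lemma pvFlattenMapSingleton {α β : Type} (f : α → β) (l : List α) :
    (l.map (fun x => [f x])).flatten = l.map f := by
  induction l with
  | nil => rfl
  | cons a t ih => simp [ih]

-- one B-step: extend every pfx by every digit
def pvStep (dimension : Int) (result : List (List Int)) : List (List Int) :=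
  result.flatMap (fun pfx => (PySem.List.pyRange 0 dimension 1).map (fun d => pfx ++ [d]))

lemma permGoA_succ (n : Nat) (dimension : Int) :
    permGoA (n + 1) dimension = pvStep dimension (permGoA n dimension) := by
  have hin : ∀ (result : List (List Int)) (i : List Int),
      (PySem.List.pyRange 0 dimension 1).foldl (fun result digit => result ++ [i ++ [digit]]) result
      = result ++ (PySem.List.pyRange 0 dimension 1).map (fun d => i ++ [d]) := by
    intro result i
    rw [PySem.List.foldl_append_eq_flatMap (fun digit => [i ++ [digit]])]
    simp [List.flatMap, pvFlattenMapSingleton]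
  show (permGoA n dimension).foldl _ [] = _
  simp only [hin]
  rw [PySem.List.foldl_append_eq_flatMap]
  simp [pvStep]

lemma permGoA_eq_iter (n : Nat) (dimension : Int) :
    permGoA n dimension = (List.range n).foldl (fun r _ => pvStep dimension r) [[]] := by
  induction n with
  | zero => rfl
  | succ n ih => rw [permGoA_succ, List.range_succ, List.foldl_append, ih]; rfl

-- ===== VERDICT (by name: the statement is the Claim_ definition above) =====
theorem permutation_generator_spec : Claim_equal_permutation_generator := by
  intro op dim _ hpre
  show permGoA op.toNat dim = (PySem.List.pyRange 0 op 1).foldl (fun r _ => pvStep dim r) [[]]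
  rw [PySem.List.pyRange_one, List.foldl_map, permGoA_eq_iter]
  simp
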